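-- pv_equiv track=rewrite | github.com/fnord123/CoboSyncVerifier | coboVerify.py | fiveBitsToEight
-- ===== SOURCE A (Python) =====
-- def fiveBitsToEight(fivebit_values):
--   byte_values = []
--   current_word = 0
--   bits = 0
--
--   for fivebits in fivebit_values:
--     current_word = (current_word << 5) | fivebits
--     bits += 5
--     while bits > 8:
--       bits -= 8
--       byte = current_word >> bits & 0xFF
--       byte_values.append(byte)
--       current_word &= 0xFF
--   return byte_values
-- ===== SOURCE B (Python) =====
-- def fiveBitsToEight(fivebit_values):
--   # Pass 1: pack the values into one running integer, recording each intermediate.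
--   # Only the low 16 bits of the running value can still end up in an uncut byte
--   # (pass 2 reads at most bits 0..15), so keep it trimmed to two bytes.
--   packed = []
--   acc = 0
--   for v in fivebit_values:
--     acc = ((acc << 5) | v) & 0xFFFF
--     packed.append(acc)
--   # Pass 2: cut bytes out of the recorded packed values, carrying only a
--   # count of bits not yet cut.
--   out = []
--   pending = 0
--   for p in packed:
--     pending += 5
--     if pending > 8:
--       pending -= 8
--       out.append((p >> pending) & 0xFF)
--   return out
-- ===== Notes on version B (the rewrite author's own statement) =====
-- stated objective: alternative
-- what changed: A streams through one loop that keeps an 8-bit masked word and emits bytes from it with an inner while over a bit counter; B is two passes: it first packs all values into a running integer trimmed to its low 16 bits (recording each intermediate), then cuts the output bytes out of those recorded values in a separate scan that carries only a count of uncut bits.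
import Mathlib
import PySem

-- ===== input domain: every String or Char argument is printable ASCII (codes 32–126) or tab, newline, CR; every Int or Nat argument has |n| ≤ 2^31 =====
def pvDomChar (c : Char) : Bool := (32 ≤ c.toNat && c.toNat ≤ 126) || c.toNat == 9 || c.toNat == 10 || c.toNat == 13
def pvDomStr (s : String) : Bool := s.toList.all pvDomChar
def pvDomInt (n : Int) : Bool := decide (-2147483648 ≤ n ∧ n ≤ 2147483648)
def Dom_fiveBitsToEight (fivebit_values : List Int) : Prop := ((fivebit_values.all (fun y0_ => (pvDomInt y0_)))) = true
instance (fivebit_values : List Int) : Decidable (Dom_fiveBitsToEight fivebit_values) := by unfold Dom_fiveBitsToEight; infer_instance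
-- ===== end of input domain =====

-- B replaces A's single masked-word streaming loop with a pack-then-cut two-pass
-- decomposition over 16-bit-trimmed running packs (objective: alternative, same O(n) cost);
-- the return values are proved equal on every input.

-- ===== PORT A =====
-- 'while bits > 8': Python's bits stays ≥ 0 here (only ever 0..13), so it is carried as a
-- Nat; 'bits -= 8' happens only under the guard 8 < bits, where Nat subtraction is exact.
def pvEmitLoop (byte_values : List Int) (current_word : Int) (bits : Nat) : List Int × Int × Nat :=
  if 8 < bits then
    pvEmitLoop (byte_values ++ [PySem.Int.band (current_word >>> (bits - 8)) 255])
      (PySem.Int.band current_word 255) (bits - 8)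
  else (byte_values, current_word, bits)
termination_by bits
decreasing_by omega

def pvStepA (s : List Int × Int × Nat) (fivebits : Int) : List Int × Int × Nat :=
  pvEmitLoop s.1 (PySem.Int.bor (s.2.1 <<< (5:Nat)) fivebits) (s.2.2 + 5)

def fiveBitsToEight (fivebit_values : List Int) : List Int :=
  (fivebit_values.foldl pvStepA (([] : List Int), (0 : Int), (0 : Nat))).1

-- ===== PORT B =====
-- pass 1 of Source B: pack the values into one running integer trimmed to its low
-- 16 bits, recording each intermediate
def pvPack (s : List Int × Int) (v : Int) : List Int × Int :=
  let acc := PySem.Int.band (PySem.Int.bor (s.2 <<< (5:Nat)) v) 65535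
  (s.1 ++ [acc], acc)

-- pass 2 of Source B: 'pending' is a Python int that stays ≥ 0 (only ever 0..8), carried as a
-- Nat; 'pending -= 8' happens only under the guard 8 < pending, where Nat subtraction is exact.
def pvCut (s : List Int × Nat) (p : Int) : List Int × Nat :=
  let pending := s.2 + 5
  if 8 < pending then
    (s.1 ++ [PySem.Int.band (p >>> (pending - 8)) 255], pending - 8)
  else (s.1, pending)

def fiveBitsToEight_alt (fivebit_values : List Int) : List Int :=
  ((fivebit_values.foldl pvPack (([] : List Int), (0 : Int))).1.foldl pvCut
    (([] : List Int), (0 : Nat))).1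

-- ===== PRECONDITION & SPEC =====
def Spec_fiveBitsToEight (fivebit_values : List Int) (out : List Int) : Prop := out = fiveBitsToEight_alt fivebit_values
instance (fivebit_values : List Int) (out : List Int) : Decidable (Spec_fiveBitsToEight fivebit_values out) := by unfold Spec_fiveBitsToEight; infer_instance

-- ===== CLAIM (what is proved, stated in full; the proofs are below) =====
def Claim_equal_fiveBitsToEight : Prop := ∀ (fivebit_values : List Int), Dom_fiveBitsToEight fivebit_values → Spec_fiveBitsToEight fivebit_values (fiveBitsToEight fivebit_values)

-- ===== LEMMAS AND PROOFS =====

-- ---- Nat bit facts ----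

theorem pv_ldiff_zero_left (y : Nat) : Nat.ldiff 0 y = 0 := by
  apply Nat.eq_of_testBit_eq
  intro i
  simp [Nat.testBit_ldiff]

theorem pv_ldiff_zero_right (x : Nat) : Nat.ldiff x 0 = x := by
  apply Nat.eq_of_testBit_eq
  intro i
  simp [Nat.testBit_ldiff]

theorem pv_land_add_ldiff (x : Nat) : ∀ y : Nat, (x &&& y) + Nat.ldiff x y = x := by
  induction x using Nat.binaryRec with
  | zero => intro y; simp [pv_ldiff_zero_left]
  | bit b n ih =>
    intro y
    induction y using Nat.binaryRec with
    | zero => simp [pv_ldiff_zero_right]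
    | bit b' m _ =>
      rw [Nat.land_bit, Nat.ldiff_bit]
      have := ih m
      simp only [Nat.bit_val]
      cases b <;> cases b' <;> simp <;> omega

theorem pv_sub_and_eq_ldiff (x y : Nat) : x - (x &&& y) = Nat.ldiff x y := by
  have := pv_land_add_ldiff x y
  omega

theorem pv_compl_eq_ldiff (K w : Nat) : 2 ^ K - 1 - w % 2 ^ K = Nat.ldiff (2 ^ K - 1) (w % 2 ^ K) := by
  have h : (2 ^ K - 1) &&& (w % 2 ^ K) = w % 2 ^ K := by
    rw [Nat.land_comm, Nat.and_two_pow_sub_one_eq_mod, Nat.mod_mod_of_dvd _ dvd_rfl]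
  rw [← pv_sub_and_eq_ldiff, h]

theorem pv_testBit_compl (K w i : Nat) :
    (2 ^ K - 1 - w % 2 ^ K).testBit i = (decide (i < K) && ! w.testBit i) := by
  rw [pv_compl_eq_ldiff]
  simp only [Nat.testBit_ldiff, Nat.testBit_two_pow_sub_one, Nat.testBit_mod_two_pow]
  by_cases h : i < K <;> simp [h]

theorem pv_nat_case1 (n m K : Nat) :
    (n ||| m) % 2 ^ K = ((n % 2 ^ K) ||| (m % 2 ^ K)) % 2 ^ K := by
  apply Nat.eq_of_testBit_eq
  intro i
  simp only [Nat.testBit_mod_two_pow, Nat.testBit_lor]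
  by_cases h : i < K <;> simp [h]

theorem pv_nat_case2 (n m K : Nat) :
    2 ^ K - 1 - (Nat.ldiff m n) % 2 ^ K = ((n % 2 ^ K) ||| (2 ^ K - 1 - m % 2 ^ K)) % 2 ^ K := by
  apply Nat.eq_of_testBit_eq
  intro i
  simp only [pv_testBit_compl, Nat.testBit_mod_two_pow, Nat.testBit_lor, Nat.testBit_ldiff]
  by_cases h : i < K <;> simp [h]
  exact Bool.or_comm _ _

theorem pv_nat_case4 (n m K : Nat) :
    2 ^ K - 1 - (n &&& m) % 2 ^ K = ((2 ^ K - 1 - n % 2 ^ K) ||| (2 ^ K - 1 - m % 2 ^ K)) % 2 ^ K := by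
  apply Nat.eq_of_testBit_eq
  intro i
  simp only [pv_testBit_compl, Nat.testBit_mod_two_pow, Nat.testBit_lor, Nat.testBit_land]
  by_cases h : i < K <;> simp [h]

-- ---- Int emod facts ----

theorem pv_negSucc_emod (m K : Nat) :
    (Int.negSucc m) % ((2 : Int) ^ K) = ((2 ^ K - 1 - m % 2 ^ K : Nat) : Int) := by
  have h1 : (0 : Nat) < 2 ^ K := Nat.two_pow_pos K
  have hlt : m % 2 ^ K < 2 ^ K := Nat.mod_lt m h1
  have hcast : ((2 : Int) ^ K) = ((2 ^ K : Nat) : Int) := by push_cast; ring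
  have hm : (m : Int) = ((2 ^ K : Nat) : Int) * ((m / 2 ^ K : Nat) : Int) + ((m % 2 ^ K : Nat) : Int) := by
    exact_mod_cast congrArg (fun t : Nat => (t : Int)) (Nat.div_add_mod m (2 ^ K)).symm
  have hs : ((2 ^ K - 1 - m % 2 ^ K : Nat) : Int)
      = ((2 ^ K : Nat) : Int) - 1 - ((m % 2 ^ K : Nat) : Int) := by
    rw [Nat.sub_sub, Nat.cast_sub (by omega : 1 + m % 2 ^ K ≤ 2 ^ K)]
    push_cast
    ring
  have key : Int.negSucc m
      = ((2 ^ K - 1 - m % 2 ^ K : Nat) : Int)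
        + ((2 ^ K : Nat) : Int) * (-(((m / 2 ^ K : Nat) : Int) + 1)) := by
    rw [Int.negSucc_eq, hs, hm]
    ring
  rw [hcast, key, Int.add_mul_emod_self_left]
  apply Int.emod_eq_of_lt
  · exact Int.natCast_nonneg _
  · exact_mod_cast (by omega : 2 ^ K - 1 - m % 2 ^ K < 2 ^ K)

theorem pv_bor_natCast_negSucc (n m : Nat) :
    PySem.Int.bor (n : Int) (Int.negSucc m) = Int.negSucc (Nat.ldiff m n) := by
  have hn : ¬ (0 : Int) ≤ Int.negSucc m := by
    have := Int.negSucc_lt_zero m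
    omega
  have he : (-(Int.negSucc m) - 1) = (m : Int) := by
    rw [Int.negSucc_eq]
    ring
  simp only [PySem.Int.bor, Int.natCast_nonneg, if_true, hn, if_false, he, Int.toNat_natCast]
  rw [pv_sub_and_eq_ldiff, Int.negSucc_eq]
  ring

theorem pv_bor_negSucc_natCast (n m : Nat) :
    PySem.Int.bor (Int.negSucc n) (m : Int) = Int.negSucc (Nat.ldiff n m) := by
  have hn : ¬ (0 : Int) ≤ Int.negSucc n := by
    have := Int.negSucc_lt_zero n
    omega
  have he : (-(Int.negSucc n) - 1) = (n : Int) := by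
    rw [Int.negSucc_eq]
    ring
  simp only [PySem.Int.bor, Int.natCast_nonneg, if_true, hn, if_false, he, Int.toNat_natCast]
  rw [pv_sub_and_eq_ldiff, Int.negSucc_eq]
  ring

theorem pv_bor_negSucc_negSucc (n m : Nat) :
    PySem.Int.bor (Int.negSucc n) (Int.negSucc m) = Int.negSucc (n &&& m) := by
  have hn : ¬ (0 : Int) ≤ Int.negSucc n := by
    have := Int.negSucc_lt_zero n
    omega
  have hm : ¬ (0 : Int) ≤ Int.negSucc m := by
    have := Int.negSucc_lt_zero m
    omega
  have hen : (-(Int.negSucc n) - 1) = (n : Int) := by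
    rw [Int.negSucc_eq]; ring
  have hem : (-(Int.negSucc m) - 1) = (m : Int) := by
    rw [Int.negSucc_eq]; ring
  simp only [PySem.Int.bor, hn, hm, if_false, hen, hem, Int.toNat_natCast]
  rw [Int.negSucc_eq]
  ring

theorem pv_bor_emod (a b : Int) (K : Nat) :
    PySem.Int.bor a b % (2 : Int) ^ K = PySem.Int.bor (a % 2 ^ K) (b % 2 ^ K) % 2 ^ K := by
  have hcast : ((2 : Int) ^ K) = ((2 ^ K : Nat) : Int) := by push_cast; ring
  match a, b with
  | (n : Nat), (m : Nat) =>
    rw [PySem.Int.bor_natCast, hcast, ← Int.natCast_emod, ← Int.natCast_emod, ← Int.natCast_emod,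
      PySem.Int.bor_natCast, ← Int.natCast_emod]
    exact_mod_cast pv_nat_case1 n m K
  | (n : Nat), Int.negSucc m =>
    rw [pv_bor_natCast_negSucc, pv_negSucc_emod, pv_negSucc_emod, hcast, ← Int.natCast_emod,
      PySem.Int.bor_natCast, ← Int.natCast_emod]
    exact_mod_cast pv_nat_case2 n m K
  | Int.negSucc n, (m : Nat) =>
    rw [pv_bor_negSucc_natCast, pv_negSucc_emod, pv_negSucc_emod, hcast, ← Int.natCast_emod,
      PySem.Int.bor_natCast, ← Int.natCast_emod]
    rw [Nat.lor_comm]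
    exact_mod_cast pv_nat_case2 m n K
  | Int.negSucc n, Int.negSucc m =>
    rw [pv_bor_negSucc_negSucc, pv_negSucc_emod, pv_negSucc_emod, pv_negSucc_emod, hcast,
      PySem.Int.bor_natCast, ← Int.natCast_emod]
    exact_mod_cast pv_nat_case4 n m K

theorem pv_band_255 (a : Int) : PySem.Int.band a 255 = a % 256 := by
  match a with
  | (n : Nat) =>
    rw [show ((255 : Int)) = ((255 : Nat) : Int) by norm_num, PySem.Int.band_natCast]
    have h : n &&& 255 = n % 256 := by
      have := Nat.and_two_pow_sub_one_eq_mod n 8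
      norm_num at this
      exact this
    rw [h, show ((256 : Int)) = ((256 : Nat) : Int) by norm_num, ← Int.natCast_emod]
  | Int.negSucc m =>
    have hn : ¬ (0 : Int) ≤ Int.negSucc m := by
      have := Int.negSucc_lt_zero m
      omega
    have he : (-(Int.negSucc m) - 1) = (m : Int) := by
      rw [Int.negSucc_eq]; ring
    simp only [PySem.Int.band, hn, if_false, (by norm_num : (0 : Int) ≤ 255), if_true, he,
      Int.toNat_natCast]
    have h255 : ((255 : Int)).toNat = 255 := rfl
    rw [h255]
    have h : (255 : Nat) &&& m = m % 256 := by
      have := Nat.and_two_pow_sub_one_eq_mod m 8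
      norm_num at this
      rw [Nat.land_comm]
      exact this
    rw [h, show ((256 : Int)) = ((2 : Int) ^ (8 : Nat)) by norm_num, pv_negSucc_emod]
    norm_num

theorem pv_band_65535 (a : Int) : PySem.Int.band a 65535 = a % 65536 := by
  match a with
  | (n : Nat) =>
    rw [show ((65535 : Int)) = ((65535 : Nat) : Int) by norm_num, PySem.Int.band_natCast]
    have h : n &&& 65535 = n % 65536 := by
      have := Nat.and_two_pow_sub_one_eq_mod n 16
      norm_num at this
      exact this
    rw [h, show ((65536 : Int)) = ((65536 : Nat) : Int) by norm_num, ← Int.natCast_emod]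
  | Int.negSucc m =>
    have hn : ¬ (0 : Int) ≤ Int.negSucc m := by
      have := Int.negSucc_lt_zero m
      omega
    have he : (-(Int.negSucc m) - 1) = (m : Int) := by
      rw [Int.negSucc_eq]; ring
    simp only [PySem.Int.band, hn, if_false, (by norm_num : (0 : Int) ≤ 65535), if_true, he,
      Int.toNat_natCast]
    have h65535 : ((65535 : Int)).toNat = 65535 := rfl
    rw [h65535]
    have h : (65535 : Nat) &&& m = m % 65536 := by
      have := Nat.and_two_pow_sub_one_eq_mod m 16
      norm_num at this
      rw [Nat.land_comm]
      exact this
    rw [h, show ((65536 : Int)) = ((2 : Int) ^ (16 : Nat)) by norm_num, pv_negSucc_emod]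
    norm_num

-- ---- modular windows ----

theorem pv_shl5_emod {x y : Int} (k : Nat) (h : x % 2 ^ k = y % 2 ^ k) :
    (x <<< (5 : Nat)) % 2 ^ (k + 5) = (y <<< (5 : Nat)) % 2 ^ (k + 5) := by
  rw [Int.shiftLeft_eq, Int.shiftLeft_eq, pow_add, mul_comm ((2 : Int) ^ k) (2 ^ 5),
    mul_comm x ((2 : Int) ^ (5 : Nat)), mul_comm y ((2 : Int) ^ (5 : Nat))]
  rw [Int.mul_emod_mul_of_pos _ _ (by positivity), Int.mul_emod_mul_of_pos _ _ (by positivity), h]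

theorem pv_ediv_emod_window (x : Int) (k : Nat) :
    (x / 2 ^ k) % 2 ^ 8 = (x % 2 ^ (k + 8)) / 2 ^ k := by
  have hk : (0 : Int) < 2 ^ k := by positivity
  have hk8 : (0 : Int) < 2 ^ (k + 8) := by positivity
  have hx := Int.emod_add_mul_ediv x (2 ^ (k + 8))
  have hr0 : (0 : Int) ≤ x % 2 ^ (k + 8) := Int.emod_nonneg x (ne_of_gt hk8)
  have hrlt : x % 2 ^ (k + 8) < 2 ^ (k + 8) := Int.emod_lt_of_pos x hk8
  have hxe : x = x % 2 ^ (k + 8) + 2 ^ k * (2 ^ 8 * (x / 2 ^ (k + 8))) := by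
    rw [← mul_assoc, ← pow_add]
    omega
  conv_lhs => rw [hxe]
  rw [Int.add_mul_ediv_left _ _ (ne_of_gt hk), Int.add_mul_emod_self_left]
  apply Int.emod_eq_of_lt (Int.ediv_nonneg hr0 (le_of_lt hk))
  rw [Int.ediv_lt_iff_lt_mul hk]
  calc x % 2 ^ (k + 8) < 2 ^ (k + 8) := hrlt
    _ = 2 ^ 8 * 2 ^ k := by rw [← pow_add]; ring_nf

theorem pv_byte_congr {x y : Int} (k : Nat) (h : x % 2 ^ (k + 8) = y % 2 ^ (k + 8)) :
    PySem.Int.band (x >>> k) 255 = PySem.Int.band (y >>> k) 255 := by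
  rw [pv_band_255, pv_band_255, Int.shiftRight_eq_div_pow, Int.shiftRight_eq_div_pow]
  have hc : ((2 ^ k : Nat) : Int) = (2 : Int) ^ k := by push_cast; ring
  rw [hc, show ((256 : Int)) = (2 : Int) ^ (8 : Nat) by norm_num,
    pv_ediv_emod_window, pv_ediv_emod_window, h]

theorem pv_emod_restrict {x y : Int} {j k : Nat} (hjk : j ≤ k) (h : x % 2 ^ k = y % 2 ^ k) :
    x % 2 ^ j = y % 2 ^ j := by
  have hd : ((2 : Int) ^ j) ∣ 2 ^ k := pow_dvd_pow 2 hjk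
  calc x % 2 ^ j = (x % 2 ^ k) % 2 ^ j := (Int.emod_emod_of_dvd x hd).symm
    _ = (y % 2 ^ k) % 2 ^ j := by rw [h]
    _ = y % 2 ^ j := Int.emod_emod_of_dvd y hd

-- ---- A-side loop shapes ----

theorem pv_emitLoop_low (bv : List Int) (cw : Int) (b : Nat) (hb : b ≤ 8) :
    pvEmitLoop bv cw b = (bv, cw, b) := by
  rw [pvEmitLoop, if_neg (by omega)]

theorem pv_emitLoop_one (bv : List Int) (cw : Int) (b : Nat) (h1 : 8 < b) (h2 : b ≤ 16) :
    pvEmitLoop bv cw b =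
      (bv ++ [PySem.Int.band (cw >>> (b - 8)) 255], PySem.Int.band cw 255, b - 8) := by
  rw [pvEmitLoop, if_pos h1, pv_emitLoop_low _ _ _ (by omega)]

-- ---- main invariant: A's state vs B's two passes ----
-- After any prefix: A's emitted bytes equal the cut pass's output on the packed
-- prefixes, A's bit counter equals the cut pass's pending counter (both ≤ 8), and
-- A's masked word agrees with B's unbounded packed integer modulo 2^(bits+3).

theorem pv_main (xs : List Int) :
    (xs.foldl pvStepA ([], 0, 0)).1
        = ((xs.foldl pvPack ([], 0)).1.foldl pvCut ([], 0)).1 ∧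
    (xs.foldl pvStepA ([], 0, 0)).2.2
        = ((xs.foldl pvPack ([], 0)).1.foldl pvCut ([], 0)).2 ∧
    (xs.foldl pvStepA ([], 0, 0)).2.2 ≤ 8 ∧
    (xs.foldl pvStepA ([], 0, 0)).2.1 % 2 ^ ((xs.foldl pvStepA ([], 0, 0)).2.2 + 3)
        = (xs.foldl pvPack ([], 0)).2 % 2 ^ ((xs.foldl pvStepA ([], 0, 0)).2.2 + 3) := by
  induction xs using List.reverseRecOn with
  | nil => exact ⟨rfl, rfl, by norm_num, rfl⟩
  | append_singleton ys v ih =>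
    rcases hst : ys.foldl pvStepA ([], 0, 0) with ⟨bv, cw, bits⟩
    rcases hpk : ys.foldl pvPack ([], 0) with ⟨pk, accU⟩
    rcases hct : pk.foldl pvCut ([], 0) with ⟨ob, pend⟩
    rw [hst, hpk, hct] at ih
    obtain ⟨ih1, ih2, ih3, ih4⟩ := ih
    simp only at ih1 ih2 ih3 ih4
    have hfoldA : (ys ++ [v]).foldl pvStepA ([], 0, 0)
        = pvEmitLoop bv (PySem.Int.bor (cw <<< (5:Nat)) v) (bits + 5) := by
      rw [List.foldl_append, hst]
      rfl
    set a' := PySem.Int.band (PySem.Int.bor (accU <<< (5:Nat)) v) 65535 with ha'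
    have hfoldP : (ys ++ [v]).foldl pvPack ([], 0) = (pk ++ [a'], a') := by
      rw [List.foldl_append, hpk]
      rfl
    have hfoldC : (pk ++ [a']).foldl pvCut ([], 0) = pvCut (ob, pend) a' := by
      rw [List.foldl_append, hct]
      rfl
    -- agreement of the two new words in a window of bits+8 (≤ 16) bits
    have hcong : (PySem.Int.bor (cw <<< (5:Nat)) v) % 2 ^ (bits + 8)
        = a' % 2 ^ (bits + 8) := by
      have hsh := pv_shl5_emod (bits + 3) ih4
      have he : bits + 3 + 5 = bits + 8 := by omega
      rw [he] at hsh
      have hmask : a' % 2 ^ (bits + 8) = (PySem.Int.bor (accU <<< (5:Nat)) v) % 2 ^ (bits + 8) := by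
        rw [ha', pv_band_65535, show ((65536 : Int)) = (2 : Int) ^ (16 : Nat) by norm_num]
        exact Int.emod_emod_of_dvd _ (pow_dvd_pow 2 (by omega : bits + 8 ≤ 16))
      rw [hmask]
      calc (PySem.Int.bor (cw <<< (5:Nat)) v) % 2 ^ (bits + 8)
          = PySem.Int.bor ((cw <<< (5:Nat)) % 2 ^ (bits + 8)) (v % 2 ^ (bits + 8)) % 2 ^ (bits + 8) :=
            pv_bor_emod _ _ _
        _ = PySem.Int.bor (((accU) <<< (5:Nat)) % 2 ^ (bits + 8)) (v % 2 ^ (bits + 8)) % 2 ^ (bits + 8) := by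
            rw [hsh]
        _ = (PySem.Int.bor (accU <<< (5:Nat)) v) % 2 ^ (bits + 8) := (pv_bor_emod _ _ _).symm
    rw [hfoldA, hfoldP, hfoldC]
    by_cases hb : bits + 5 ≤ 8
    · rw [pv_emitLoop_low _ _ _ hb]
      have hc : pvCut (ob, pend) a' = (ob, pend + 5) := by
        rw [pvCut, if_neg (by simp only []; omega)]
      rw [hc]
      refine ⟨ih1, by simpa using ih2, by omega, ?_⟩
      show PySem.Int.bor (cw <<< (5:Nat)) v % 2 ^ (bits + 5 + 3) = a' % 2 ^ (bits + 5 + 3)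
      have he : bits + 5 + 3 = bits + 8 := by omega
      rw [he]
      exact hcong
    · rw [pv_emitLoop_one _ _ _ (by omega) (by omega)]
      have hc : pvCut (ob, pend) a'
          = (ob ++ [PySem.Int.band (a' >>> (pend + 5 - 8)) 255], pend + 5 - 8) := by
        rw [pvCut, if_pos (by simp only []; omega)]
      rw [hc]
      have hbyte : PySem.Int.band ((PySem.Int.bor (cw <<< (5:Nat)) v) >>> (bits + 5 - 8)) 255
          = PySem.Int.band (a' >>> (pend + 5 - 8)) 255 := by
        rw [← ih2]
        apply pv_byte_congr (bits + 5 - 8)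
        have he : bits + 5 - 8 + 8 = bits + 5 := by omega
        rw [he]
        exact pv_emod_restrict (by omega) hcong
      refine ⟨by rw [ih1, hbyte], ?_, ?_, ?_⟩
      · show bits + 5 - 8 = pend + 5 - 8
        omega
      · show bits + 5 - 8 ≤ 8
        omega
      show PySem.Int.band (PySem.Int.bor (cw <<< (5:Nat)) v) 255 % 2 ^ (bits + 5 - 8 + 3)
          = a' % 2 ^ (bits + 5 - 8 + 3)
      have h1 : PySem.Int.band (PySem.Int.bor (cw <<< (5:Nat)) v) 255 % 2 ^ (bits + 5 - 8 + 3)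
          = (PySem.Int.bor (cw <<< (5:Nat)) v) % 2 ^ (bits + 5 - 8 + 3) := by
        rw [pv_band_255, show ((256 : Int)) = (2 : Int) ^ (8 : Nat) by norm_num]
        exact Int.emod_emod_of_dvd _ (pow_dvd_pow 2 (by omega))
      rw [h1]
      exact pv_emod_restrict (by omega) hcong

-- ===== VERDICT (by name: the statement is the Claim_ definition above) =====
theorem fiveBitsToEight_spec : Claim_equal_fiveBitsToEight := by
  intro xs _
  unfold Spec_fiveBitsToEight fiveBitsToEight fiveBitsToEight_alt
  exact (pv_main xs).1
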